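-- pv_equiv track=rewrite | github.com/PriyanshuKanyal37/Slack-Huddle-and-Click-up | services/clickup.py | search_backlog_by_query
-- ===== SOURCE A (Python) =====
-- def search_backlog_by_query(query: str, all_tasks: list[dict]) -> list[dict]:
--     """
--     Filter backlog tasks by query — matches task name OR assignee name (case-insensitive).
--     Called client-side from cached task list so it's instant regardless of task count.
--     """
--     q = query.lower()
--     matched = [
--         t for t in all_tasks
--         if q in t.get("name", "").lower() or q in t.get("assignees", "").lower()
--     ]
--     # Assigned tasks first within matches
--     assigned   = [t for t in matched if t.get("assignees")]
--     unassigned = [t for t in matched if not t.get("assignees")]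
--     return (assigned + unassigned)[:100]
-- ===== SOURCE B (Python) =====
-- def search_backlog_by_query(query: str, all_tasks: list[dict]) -> list[dict]:
--     # Filter once, then stable-sort by the boolean key "unassigned?":
--     # False (assigned) sorts before True, and stability keeps each group's order.
--     q = query.lower()
--     matched = [
--         t for t in all_tasks
--         if q in t.get("name", "").lower() or q in t.get("assignees", "").lower()
--     ]
--     matched.sort(key=lambda t: not t.get("assignees"))
--     return matched[:100]
-- ===== Notes on version B (the rewrite author's own statement) =====
-- stated objective: idiomatic
-- what changed: Replaces A's two partition comprehensions over the matches by a stable in-place sort of the matched list keyed on the boolean 'not assigned' (False first), which is the idiomatic Python way to put assigned tasks first while preserving order.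
import Mathlib
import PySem

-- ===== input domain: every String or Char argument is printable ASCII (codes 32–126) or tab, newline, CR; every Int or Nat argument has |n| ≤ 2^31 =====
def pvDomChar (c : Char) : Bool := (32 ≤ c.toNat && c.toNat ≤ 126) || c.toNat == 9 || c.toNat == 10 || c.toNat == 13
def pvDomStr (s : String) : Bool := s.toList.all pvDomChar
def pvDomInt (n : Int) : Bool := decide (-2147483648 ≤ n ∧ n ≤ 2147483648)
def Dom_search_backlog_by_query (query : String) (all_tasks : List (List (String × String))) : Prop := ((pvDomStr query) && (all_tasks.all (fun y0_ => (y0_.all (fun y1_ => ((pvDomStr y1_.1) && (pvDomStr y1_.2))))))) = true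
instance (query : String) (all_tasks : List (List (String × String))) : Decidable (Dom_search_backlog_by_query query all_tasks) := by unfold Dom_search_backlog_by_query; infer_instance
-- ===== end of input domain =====

-- B replaces A's two partition comprehensions by a stable sort of the matched list keyed
-- on "not assigned" (objective: idiomatic); return values proved equal.


-- t.get(k, dflt) on a dict rendered as an association list (first match wins)
def pvGet (t : List (String × String)) (k dflt : String) : String :=
  ((t.find? (fun p => p.1 == k)).map (·.2)).getD dflt

-- truthiness of t.get("assignees"): key present with a non-empty string value
def pvAssigned (t : List (String × String)) : Bool :=
  match t.find? (fun p => p.1 == "assignees") with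
  | some p => p.2 != ""
  | none   => false

-- q in t.get("name","").lower() or q in t.get("assignees","").lower()
def pvMatch (q : String) (t : List (String × String)) : Bool :=
  PySem.Str.isIn q (PySem.Str.lower (pvGet t "name" "")) ||
  PySem.Str.isIn q (PySem.Str.lower (pvGet t "assignees" ""))

-- ===== PORT A =====
def search_backlog_by_query (query : String) (all_tasks : List (List (String × String))) : List (List (String × String)) :=
  let q := PySem.Str.lower query
  let matched := all_tasks.filter (fun t => pvMatch q t)
  let assigned := matched.filter (fun t => pvAssigned t)
  let unassigned := matched.filter (fun t => !pvAssigned t)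
  PySem.List.slice (assigned ++ unassigned) none (some 100)

-- ===== PORT B =====
-- Python's bool sort key `not t.get("assignees")` ported as the Int 0/1 it is in Python
-- (False = 0 < True = 1); the stable sort is PySem.List.sorted.
def pvKey (t : List (String × String)) : Int := if pvAssigned t then 0 else 1

def search_backlog_by_query_alt (query : String) (all_tasks : List (List (String × String))) : List (List (String × String)) :=
  let q := PySem.Str.lower query
  let matched := all_tasks.filter (fun t => pvMatch q t)
  let sortedMatched := PySem.List.sorted matched pvKey
  PySem.List.slice sortedMatched none (some 100)

-- ===== PRECONDITION & SPEC =====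
def Spec_search_backlog_by_query (query : String) (all_tasks : List (List (String × String))) (out : List (List (String × String))) : Prop := out = search_backlog_by_query_alt query all_tasks
instance (query : String) (all_tasks : List (List (String × String))) (out : List (List (String × String))) : Decidable (Spec_search_backlog_by_query query all_tasks out) := by unfold Spec_search_backlog_by_query; infer_instance

-- ===== CLAIM =====
def Claim_equal_search_backlog_by_query : Prop := ∀ (query : String) (all_tasks : List (List (String × String))), Dom_search_backlog_by_query query all_tasks → Spec_search_backlog_by_query query all_tasks (search_backlog_by_query query all_tasks)

-- ===== LEMMAS AND PROOFS =====

-- insertBy appends at the end when `before` never fires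
theorem pv_insertBy_end {α : Type} (before : α → α → Bool) (x : α) (l : List α)
    (h : ∀ y ∈ l, before x y = false) :
    PySem.List.insertBy before x l = l ++ [x] := by
  induction l with
  | nil => rfl
  | cons a l ih =>
    have ha := h a (List.mem_cons_self ..)
    simp only [PySem.List.insertBy, ha, Bool.false_eq_true, if_false, List.cons_append]
    exact congrArg (a :: ·) (ih (fun y hy => h y (List.mem_cons_of_mem _ hy)))

-- insertBy inserts between a prefix it does not go before and a suffix it goes before
theorem pv_insertBy_mid {α : Type} (before : α → α → Bool) (x : α) (A U : List α)
    (hA : ∀ y ∈ A, before x y = false) (hU : ∀ z ∈ U, before x z = true) :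
    PySem.List.insertBy before x (A ++ U) = A ++ x :: U := by
  induction A with
  | nil =>
    cases U with
    | nil => rfl
    | cons u us =>
      simp only [List.nil_append, PySem.List.insertBy, hU u (List.mem_cons_self ..), if_true]
  | cons a A ih =>
    have ha := hA a (List.mem_cons_self ..)
    simp only [List.cons_append, PySem.List.insertBy, ha, Bool.false_eq_true, if_false]
    exact congrArg (a :: ·) (ih (fun y hy => hA y (List.mem_cons_of_mem _ hy)))

-- the stable insertion sort of B, started from assigned-prefix ++ unassigned-suffix,
-- ends as A's two partition filters appended
theorem pv_sort_partition (l A U : List (List (String × String)))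
    (hA : ∀ t ∈ A, pvAssigned t = true) (hU : ∀ t ∈ U, pvAssigned t = false) :
    l.foldl (fun acc x => PySem.List.insertBy (fun a b => decide (pvKey a < pvKey b)) x acc) (A ++ U)
      = (A ++ l.filter (fun t => pvAssigned t)) ++ (U ++ l.filter (fun t => !pvAssigned t)) := by
  induction l generalizing A U with
  | nil => simp
  | cons t l ih =>
    simp only [List.foldl_cons, List.filter_cons]
    by_cases ht : pvAssigned t = true
    · have hins : PySem.List.insertBy (fun a b => decide (pvKey a < pvKey b)) t (A ++ U)
          = A ++ t :: U := by
        refine pv_insertBy_mid _ _ _ _ (fun y hy => ?_) (fun z hz => ?_)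
        · simp [pvKey, ht, hA y hy]
        · simp [pvKey, ht, hU z hz]
      have hA' : ∀ y ∈ A ++ [t], pvAssigned y = true := by
        intro y hy
        rcases List.mem_append.mp hy with h | h
        · exact hA y h
        · simp_all
      rw [hins, show A ++ t :: U = (A ++ [t]) ++ U by simp, ih (A ++ [t]) U hA' hU]
      simp [ht]
    · have hins : PySem.List.insertBy (fun a b => decide (pvKey a < pvKey b)) t (A ++ U)
          = (A ++ U) ++ [t] := by
        refine pv_insertBy_end _ _ _ (fun y hy => ?_)
        simp only [pvKey, ht]
        rcases List.mem_append.mp hy with h | h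
        · simp [hA y h]
        · simp [hU y h]
      have hU' : ∀ y ∈ U ++ [t], pvAssigned y = false := by
        intro y hy
        rcases List.mem_append.mp hy with h | h
        · exact hU y h
        · rw [List.mem_singleton.mp h]; exact Bool.eq_false_iff.mpr ht
      rw [hins, List.append_assoc, ih A (U ++ [t]) hA hU']
      simp [ht]

theorem search_backlog_by_query_spec : Claim_equal_search_backlog_by_query := by
  intro query all_tasks _
  show search_backlog_by_query query all_tasks = search_backlog_by_query_alt query all_tasks
  simp only [search_backlog_by_query, search_backlog_by_query_alt, PySem.List.sorted,
    if_neg (by decide : ¬ (false = true))]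
  rw [show ([] : List (List (String × String))) = [] ++ [] from rfl,
    pv_sort_partition _ [] [] (by simp) (by simp)]
  simp
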